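-- pv_equiv track=rewrite | github.com/yongsun-yoon/python-algorithms | programmers/92334.py | solution
-- ===== SOURCE A (Python) =====
-- from collections import defaultdict
--
-- def solution(id_list, report, k):
--     id2idx = {i:idx for idx, i in enumerate(id_list)}
--     accused_result = defaultdict(set)
--
--     for r in report:
--         user, accused = r.split()
--         accused_result[accused].add(user)
--
--     answer = [0] * len(id_list)
--     for accused, users in accused_result.items():
--         if len(users) >= k:
--             for u in users:
--                 answer[id2idx[u]] += 1
--
--     return answer
-- ===== SOURCE B (Python) =====
-- from collections import defaultdict, Counter
--
-- def solution(id_list, report, k):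
--     # group by reporter: user -> set of distinct accused
--     reported = defaultdict(set)
--     for r in report:
--         user, accused = r.split()
--         reported[user].add(accused)
--     # distinct-reporter count per accused, derived from the user-grouped sets
--     cnt = Counter(a for accs in reported.values() for a in accs)
--     # assemble the answer positionally, one comprehension per id
--     return [sum(cnt[a] >= k for a in reported[u]) for u in id_list]
-- ===== Notes on version B (the rewrite author's own statement) =====
-- stated objective: alternative
-- what changed: Instead of A's accused->reporter-set grouping with index-dict increments into a mutated answer array, B groups by the opposite key (reporter -> set of accused), derives the per-accused distinct-reporter Counter from those sets, and assembles the answer positionally with one comprehension per id (no id2idx, no in-place increments).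
-- outside the precondition, e.g. on solution(['a', 'a'], ['a b'], 1): A returns [0, 1], B returns [1, 1]
import Mathlib
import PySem

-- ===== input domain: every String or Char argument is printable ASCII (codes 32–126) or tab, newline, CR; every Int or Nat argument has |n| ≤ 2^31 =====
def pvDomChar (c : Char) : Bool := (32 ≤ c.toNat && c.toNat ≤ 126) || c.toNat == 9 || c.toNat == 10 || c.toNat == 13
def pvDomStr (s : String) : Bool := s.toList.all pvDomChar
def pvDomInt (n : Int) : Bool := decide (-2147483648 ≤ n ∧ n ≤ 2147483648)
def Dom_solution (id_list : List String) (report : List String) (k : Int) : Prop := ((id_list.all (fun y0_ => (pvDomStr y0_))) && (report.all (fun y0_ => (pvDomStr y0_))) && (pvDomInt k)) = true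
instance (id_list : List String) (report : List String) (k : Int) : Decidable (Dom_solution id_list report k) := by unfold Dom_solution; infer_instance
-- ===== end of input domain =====

-- B replaces A's accused->reporter-set grouping plus index-dict increments into a mutated answer array
-- by the opposite grouping (reporter -> set of accused), a Counter derived from those sets, and a
-- positional per-id comprehension assembling the answer (objective: alternative decomposition).


-- ===== PORT A =====
def solution (id_list : List String) (report : List String) (k : Int) : List Int :=
  let id2idx : PySem.Dict String Int :=
    (PySem.List.enumerate id_list).foldl (fun d p => d.insert p.2 p.1) PySem.Dict.empty
  let accused_result : PySem.Dict String (PySem.Set String) :=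
    report.foldl (fun d r =>
      match PySem.Str.split₀ r with
      | [user, accused] => d.modify accused [] (fun s => PySem.Set.add s user)
      | _ => d  -- Python raises ValueError on the 2-tuple unpack here; such reports are excluded by Pre_solution
      ) PySem.Dict.empty
  let answer : List Int := List.replicate id_list.length 0
  accused_result.items.foldl (fun ans p =>
    if k ≤ (p.2.length : Int) then
      -- 'for u in users' iterates a Python set: the per-index increments commute, so the result is order-independent
      -- id2idx[u] raises KeyError when u ∉ id_list (excluded by Pre_solution); the -1 default is never reached there
      p.2.foldl (fun ans u =>
        PySem.List.pySetD ans (id2idx.getD u (-1)) (PySem.List.pyGetD ans (id2idx.getD u (-1)) 0 + 1)) ans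
    else ans) answer

-- ===== PORT B =====
def solution_alt (id_list : List String) (report : List String) (k : Int) : List Int :=
  let reported : PySem.Dict String (PySem.Set String) :=
    report.foldl (fun d r =>
      -- 'user, accused = r.split()': raises ValueError unless exactly two words (excluded by Pre_solution);
      -- ported by hand as a length guard plus head extraction (exact on two-word reports)
      let ws := PySem.Str.split₀ r
      if ws.length = 2 then
        d.modify (ws.headD "") [] (fun s => PySem.Set.add s ((ws.drop 1).headD ""))
      else d) PySem.Dict.empty
  let cnt : PySem.Dict String Int :=
    PySem.Dict.counter (reported.values.flatMap (fun s => s))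
  id_list.map (fun u =>
    (reported.getD u []).foldl (fun acc a => acc + (if k ≤ cnt.getD a 0 then 1 else 0)) (0 : Int))

-- ===== PRECONDITION & SPEC =====
-- the split (user, accused) pair of a report line
def pvToPair (r : String) : String × String :=
  ((PySem.Str.split₀ r).headD "", ((PySem.Str.split₀ r).drop 1).headD "")

-- the number of DISTINCT users that reported the accused a
def pvDistinctReporters (report : List String) (a : String) : Nat :=
  (PySem.Set.ofList
    ((report.filter (fun r' => (pvToPair r').2 == a)).map (fun r' => (pvToPair r').1))).length

-- Pre_ excludes reports that do not split into exactly two words (ValueError on the 2-tuple unpack in both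
-- A and B), and it requires every reporter whose accused reached k distinct reporters to occur EXACTLY once
-- in id_list: with zero occurrences A raises KeyError at id2idx[u], and with a duplicated id A's increments
-- all land on the LAST occurrence (an artefact of id2idx's dict-overwrite) while B counts at every
-- occurrence — a defensible-corner difference on duplicate keys, see claim.json "cites".
def Pre_solution (id_list : List String) (report : List String) (k : Int) : Prop :=
  ∀ r ∈ report, (PySem.Str.split₀ r).length = 2 ∧
    (k ≤ (pvDistinctReporters report (pvToPair r).2 : Int) → id_list.count (pvToPair r).1 = 1)
instance (id_list : List String) (report : List String) (k : Int) : Decidable (Pre_solution id_list report k) := by unfold Pre_solution; infer_instance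

def pvWitness_solution : List String × List String × Int := (["muzi", "frodo", "apeach"], ["muzi frodo", "apeach frodo", "muzi frodo"], 2)

def Spec_solution (id_list : List String) (report : List String) (k : Int) (out : List Int) : Prop := out = solution_alt id_list report k
instance (id_list : List String) (report : List String) (k : Int) (out : List Int) : Decidable (Spec_solution id_list report k out) := by unfold Spec_solution; infer_instance

-- ===== CLAIM (what is proved, stated in full; the proofs are below) =====
def Claim_equal_solution : Prop := ∀ (id_list : List String) (report : List String) (k : Int), Dom_solution id_list report k → Pre_solution id_list report k → Spec_solution id_list report k (solution id_list report k)

-- ===== LEMMAS AND PROOFS =====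

-- the single increment 'answer[i] += 1' (i an arbitrary Python index)
def pvInc (ans : List Int) (i : Int) : List Int :=
  PySem.List.pySetD ans i (PySem.List.pyGetD ans i 0 + 1)

-- grouping step by the SECOND component (A groups by accused; B's loop is this step on swapped pairs)
def pvStepA (d : PySem.Dict String (PySem.Set String)) (p : String × String) :
    PySem.Dict String (PySem.Set String) :=
  d.modify p.2 [] (fun s => PySem.Set.add s p.1)

-- A's report loop equals the pair-level grouping loop, given every report splits in two
lemma pvFoldA_eq (report : List String)
    (h : ∀ r ∈ report, (PySem.Str.split₀ r).length = 2)
    (d : PySem.Dict String (PySem.Set String)) :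
    report.foldl (fun d r =>
      match PySem.Str.split₀ r with
      | [user, accused] => d.modify accused [] (fun s => PySem.Set.add s user)
      | _ => d) d
    = (report.map pvToPair).foldl pvStepA d := by
  rw [List.foldl_map]
  refine PySem.List.foldl_congr_mem _ _ _ _ (fun acc r hr => ?_)
  have h2 := h r hr
  rcases hs : PySem.Str.split₀ r with _ | ⟨u, _ | ⟨v, _ | _⟩⟩ <;> simp [hs] at h2
  simp [hs, pvToPair, pvStepA]

-- B's report loop is the same grouping loop on the swapped pairs
lemma pvFoldB_eq (report : List String)
    (h : ∀ r ∈ report, (PySem.Str.split₀ r).length = 2)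
    (d : PySem.Dict String (PySem.Set String)) :
    report.foldl (fun d r =>
      let ws := PySem.Str.split₀ r
      if ws.length = 2 then
        d.modify (ws.headD "") [] (fun s => PySem.Set.add s ((ws.drop 1).headD ""))
      else d) d
    = ((report.map pvToPair).map Prod.swap).foldl pvStepA d := by
  rw [List.map_map, List.foldl_map]
  refine PySem.List.foldl_congr_mem _ _ _ _ (fun acc r hr => ?_)
  have h2 := h r hr
  rcases hs : PySem.Str.split₀ r with _ | ⟨u, _ | ⟨v, _ | _⟩⟩ <;> simp [hs] at h2
  simp [hs, pvToPair, pvStepA, Prod.swap]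

lemma pvGetD_grp (L : List (String × String)) (d : PySem.Dict String (PySem.Set String)) (a : String) :
    (L.foldl pvStepA d).getD a []
    = PySem.Set.update (d.getD a []) ((L.filter (fun p => p.2 == a)).map (fun p => p.1)) := by
  induction L generalizing d with
  | nil => simp [PySem.Set.update]
  | cons p L ih =>
    rw [List.foldl_cons, ih]
    by_cases hpa : a = p.2
    · subst hpa
      simp [pvStepA, PySem.Dict.getD_modify_self, PySem.Set.update]
    · have hne : (p.2 == a) = false := by simpa using Ne.symm hpa
      simp only [List.filter_cons, hne, Bool.false_eq_true, if_false, pvStepA]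
      rw [PySem.Dict.getD_modify_of_ne _ _ _ hpa]

lemma pvKeys_grp (L : List (String × String)) :
    (L.foldl pvStepA PySem.Dict.empty).keys = PySem.Set.ofList (L.map (fun p => p.2)) := by
  have := PySem.Dict.keys_foldl_modify_key L (fun p => p.2) ([] : PySem.Set String)
    (fun _ p => (fun s => PySem.Set.add s p.1)) PySem.Dict.empty
  simpa [pvStepA, PySem.Dict.keys_empty, PySem.Set.update, PySem.Set.ofList_eq_foldl] using this

lemma pvKeys_grp_nodup (L : List (String × String)) :
    (L.foldl pvStepA PySem.Dict.empty).keys.Nodup := by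
  rw [pvKeys_grp]; exact PySem.Set.nodup_ofList _

-- the flattened (user, accused) pairs of the grouped dict, as a flatMap over the key set
lemma pvPA_eq (L : List (String × String)) :
    (L.foldl pvStepA PySem.Dict.empty).items.flatMap (fun q => q.2.map (fun u => (u, q.1)))
    = (PySem.Set.ofList (L.map (fun p => p.2))).flatMap
        (fun a => (PySem.Set.ofList ((L.filter (fun p => p.2 == a)).map (fun p => p.1))).map
          (fun u => (u, a))) := by
  rw [PySem.Dict.items_eq_map_keys _ (pvKeys_grp_nodup L) ([] : PySem.Set String),
      List.flatMap_map, pvKeys_grp]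
  refine List.flatMap_congr (fun a _ => ?_)
  rw [pvGetD_grp, PySem.Dict.getD_empty]
  simp [PySem.Set.update, PySem.Set.ofList_eq_foldl]

lemma pvFlat_nodup (ks : List String) (f : String → List String)
    (hk : ks.Nodup) (hf : ∀ a, (f a).Nodup) :
    (ks.flatMap (fun a => (f a).map (fun u => (u, a)))).Nodup := by
  induction ks with
  | nil => simp
  | cons b ks ih =>
    obtain ⟨hb, hk'⟩ := List.nodup_cons.mp hk
    rw [List.flatMap_cons, List.nodup_append]
    refine ⟨List.Nodup.map (fun u v h => congrArg Prod.fst h) (hf b), ih hk', ?_⟩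
    intro x hx y hy hEq
    obtain ⟨u, _, rfl⟩ := List.mem_map.mp hx
    obtain ⟨c, hc, hy'⟩ := List.mem_flatMap.mp hy
    obtain ⟨v, _, rfl⟩ := List.mem_map.mp hy'
    cases hEq
    exact hb hc

-- the grouped dict's flattened pairs are a permutation of the deduplicated pair set
lemma pvPA_perm (L : List (String × String)) :
    ((L.foldl pvStepA PySem.Dict.empty).items.flatMap (fun q => q.2.map (fun u => (u, q.1)))).Perm
      (PySem.Set.ofList L) := by
  rw [pvPA_eq]
  refine (List.perm_ext_iff_of_nodup
    (pvFlat_nodup _ _ (PySem.Set.nodup_ofList _) (fun a => PySem.Set.nodup_ofList _))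
    (PySem.Set.nodup_ofList L)).mpr (fun x => ?_)
  obtain ⟨u, c⟩ := x
  rw [PySem.Set.mem_ofList, List.mem_flatMap]
  constructor
  · rintro ⟨a, _, hx⟩
    obtain ⟨u', hu', hEq⟩ := List.mem_map.mp hx
    cases hEq
    rw [PySem.Set.mem_ofList] at hu'
    obtain ⟨p, hp, rfl⟩ := List.mem_map.mp hu'
    obtain ⟨hpL, hpc⟩ := List.mem_filter.mp hp
    have h2 : p.2 = c := by simpa using hpc
    have : p = (p.1, c) := by rw [← h2]
    rwa [this] at hpL
  · intro hL
    refine ⟨c, ?_, ?_⟩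
    · rw [PySem.Set.mem_ofList]
      exact List.mem_map.mpr ⟨(u, c), hL, rfl⟩
    · refine List.mem_map.mpr ⟨u, ?_, rfl⟩
      rw [PySem.Set.mem_ofList]
      exact List.mem_map.mpr ⟨(u, c), List.mem_filter.mpr ⟨hL, by simp⟩, rfl⟩

-- fixing the first component, the deduped pairs' second components are (a permutation of)
-- the dedup of the filtered raw second components
lemma pvFstFilter_perm (M : List (String × String)) (a : String) :
    ((((PySem.Set.ofList M).filter (fun p => p.1 == a)).map (fun p => p.2))).Perm
      (PySem.Set.ofList ((M.filter (fun p => p.1 == a)).map (fun p => p.2))) := by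
  refine (List.perm_ext_iff_of_nodup ?_ (PySem.Set.nodup_ofList _)).mpr (fun b => ?_)
  · refine List.Nodup.map_on ?_ ((PySem.Set.nodup_ofList M).filter _)
    intro x hx y hy hxy
    obtain ⟨-, hx1⟩ := List.mem_filter.mp hx
    obtain ⟨-, hy1⟩ := List.mem_filter.mp hy
    have hx1' : x.1 = a := by simpa using hx1
    have hy1' : y.1 = a := by simpa using hy1
    exact Prod.ext (hx1'.trans hy1'.symm) hxy
  · rw [PySem.Set.mem_ofList, List.mem_map, List.mem_map]
    constructor
    · rintro ⟨p, hp, rfl⟩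
      obtain ⟨hpM, hp1⟩ := List.mem_filter.mp hp
      rw [PySem.Set.mem_ofList] at hpM
      exact ⟨p, List.mem_filter.mpr ⟨hpM, hp1⟩, rfl⟩
    · rintro ⟨p, hp, rfl⟩
      obtain ⟨hpM, hp1⟩ := List.mem_filter.mp hp
      refine ⟨p, List.mem_filter.mpr ⟨?_, hp1⟩, rfl⟩
      rw [PySem.Set.mem_ofList]
      exact hpM

-- B's counter equals the size of A's per-accused reporter set, for EVERY accused
lemma pvCntB_eq (L : List (String × String)) (a : String) :
    (PySem.Dict.counter
        (((L.map Prod.swap).foldl pvStepA PySem.Dict.empty).values.flatMap (fun s => s))).getD a 0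
    = (((L.foldl pvStepA PySem.Dict.empty).getD a []).length : Int) := by
  -- the flattened values of the user-grouped dict are the first components of its flattened pairs
  have h1 : (((L.map Prod.swap).foldl pvStepA PySem.Dict.empty).values.flatMap (fun s => s))
      = (((L.map Prod.swap).foldl pvStepA PySem.Dict.empty).items.flatMap
          (fun q => q.2.map (fun v => (v, q.1)))).map Prod.fst := by
    rw [List.map_flatMap]
    simp only [PySem.Dict.values, List.flatMap_map, List.map_map]
    refine List.flatMap_congr (fun q _ => ?_)
    exact (List.map_id _).symm
  rw [PySem.Dict.getD_counter, h1,
      ((pvPA_perm (L.map Prod.swap)).map Prod.fst).count_eq,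
      List.count_eq_countP, List.countP_map]
  have h2 : ((fun x => x == a) ∘ @Prod.fst String String) = fun p => p.1 == a := rfl
  rw [h2, List.countP_eq_length_filter]
  have h3 : ((L.map Prod.swap).filter (fun p => p.1 == a)).map (fun p => p.2)
      = (L.filter (fun p => p.2 == a)).map (fun p => p.1) := by
    rw [List.filter_map, List.map_map]
    rfl
  have h4 := (pvFstFilter_perm (L.map Prod.swap) a).length_eq
  rw [List.length_map] at h4
  rw [h4, h3, pvGetD_grp, PySem.Dict.getD_empty]
  simp [PySem.Set.update, PySem.Set.ofList_eq_foldl]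

-- A's triggered pairs are exactly the flattened pairs filtered by B's counter threshold
lemma pvTA_eq (L : List (String × String)) (k : Int)
    (cnt : PySem.Dict String Int)
    (hcnt : ∀ a, cnt.getD a 0 = (((L.foldl pvStepA PySem.Dict.empty).getD a []).length : Int)) :
    (L.foldl pvStepA PySem.Dict.empty).items.flatMap
        (fun q => if k ≤ (q.2.length : Int) then q.2.map (fun u => (u, q.1)) else [])
    = ((L.foldl pvStepA PySem.Dict.empty).items.flatMap (fun q => q.2.map (fun u => (u, q.1)))).filter
        (fun p => decide (k ≤ cnt.getD p.2 0)) := by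
  rw [List.filter_flatMap]
  refine List.flatMap_congr (fun q hq => ?_)
  have hval : q.2 = (L.foldl pvStepA PySem.Dict.empty).getD q.1 [] :=
    (PySem.Dict.getD_of_mem_items _ (by rw [show (q.1, q.2) = q from rfl]; exact hq)
      (pvKeys_grp_nodup L) []).symm
  have hc : cnt.getD q.1 0 = (q.2.length : Int) := by rw [hcnt, ← hval]
  rw [List.filter_map]
  have hcomp : ((fun p : String × String => decide (k ≤ cnt.getD p.2 0)) ∘ (fun u => (u, q.1)))
      = fun _ : String => decide (k ≤ cnt.getD q.1 0) := rfl
  rw [hcomp, hc]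
  by_cases hk : k ≤ (q.2.length : Int)
  · rw [if_pos hk]
    simp [decide_eq_true hk]
  · rw [if_neg hk]
    simp [decide_eq_false hk]

-- a nested fold over blocks is the fold over the flattened list
lemma pvFoldl_flatMap {α β γ : Type} (L : List α) (g : α → List β) (h : γ → β → γ) (init : γ) :
    L.foldl (fun a q => (g q).foldl h a) init = (L.flatMap g).foldl h init := by
  induction L generalizing init with
  | nil => rfl
  | cons p L ih => rw [List.foldl_cons, List.flatMap_cons, List.foldl_append, ih]

-- A's nested increment loop, flattened to a single fold over triggered pairs
lemma pvA_flat (items : List (String × PySem.Set String)) (idx : PySem.Dict String Int)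
    (k : Int) (init : List Int) :
    items.foldl (fun ans p =>
      if k ≤ (p.2.length : Int) then
        p.2.foldl (fun ans u =>
          PySem.List.pySetD ans (idx.getD u (-1)) (PySem.List.pyGetD ans (idx.getD u (-1)) 0 + 1)) ans
      else ans) init
    = (items.flatMap (fun q => if k ≤ (q.2.length : Int) then q.2.map (fun u => (u, q.1)) else [])).foldl
        (fun ans p => pvInc ans (idx.getD p.1 (-1))) init := by
  rw [← pvFoldl_flatMap]
  refine PySem.List.foldl_congr_mem _ _ _ _ (fun acc q _ => ?_)
  by_cases hq : k ≤ (q.2.length : Int)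
  · rw [if_pos hq, if_pos hq, List.foldl_map]; rfl
  · rw [if_neg hq, if_neg hq]; rfl

-- id2idx built by the enumerate-insert loop: untouched keys keep their value
lemma pvIdx_get?_not_mem (xs : List String) (u : String) (h : u ∉ xs) :
    ∀ (s : Int) (d : PySem.Dict String Int),
    ((PySem.List.enumerate xs s).foldl (fun d p => d.insert p.2 p.1) d).get? u = d.get? u := by
  induction xs with
  | nil => intro s d; simp [PySem.List.enumerate_nil]
  | cons x xs ih =>
    intro s d
    have hx : u ≠ x := fun hEq => h (hEq ▸ List.mem_cons_self)
    have hxs : u ∉ xs := fun hm => h (List.mem_cons_of_mem _ hm)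
    rw [PySem.List.enumerate_cons, List.foldl_cons, ih hxs]
    rw [PySem.Dict.get?_insert]
    simp [hx]

-- id2idx maps each id occurring exactly once to its (unique) index
lemma pvIdx_get?_mem (xs : List String) (u : String) (h1 : xs.count u = 1) :
    ∀ (s : Int) (d : PySem.Dict String Int),
    ((PySem.List.enumerate xs s).foldl (fun d p => d.insert p.2 p.1) d).get? u
      = some (s + (xs.idxOf u : Int)) := by
  induction xs with
  | nil => intro s d; simp at h1
  | cons x xs ih =>
    intro s d
    rw [PySem.List.enumerate_cons, List.foldl_cons]
    by_cases hux : u = x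
    · subst hux
      have hx : u ∉ xs := by
        rw [← List.count_eq_zero]
        rw [List.count_cons] at h1
        simpa using h1
      rw [pvIdx_get?_not_mem xs u hx, PySem.Dict.get?_insert]
      simp [List.idxOf_cons_self]
    · have h1' : xs.count u = 1 := by
        rw [List.count_cons] at h1
        simpa [Ne.symm hux] using h1
      rw [ih h1' (s + 1)]
      have : (x :: xs).idxOf u = xs.idxOf u + 1 := by
        simp [Ne.symm hux]
      rw [this]
      push_cast
      ring_nf

-- an id occurring exactly once: any position holding it IS its idxOf
lemma pvIdxOf_eq {ids : List String} {x : String} (h : ids.count x = 1) {i : Nat}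
    (hi : i < ids.length) (hx : ids[i] = x) : ids.idxOf x = i := by
  by_contra hne
  have hmem : x ∈ ids := List.count_pos_iff.mp (by omega)
  have hj := List.idxOf_lt_length_of_mem hmem
  have hgj : ids[ids.idxOf x] = x := List.getElem_idxOf hj
  have hdup : List.Duplicate x ids := by
    rcases Nat.lt_or_ge (ids.idxOf x) i with hlt | hge
    · exact List.duplicate_iff_exists_distinct_get.mpr
        ⟨⟨ids.idxOf x, hj⟩, ⟨i, hi⟩, hlt, by simp [hgj], by simp [hx]⟩
    · have hlt : i < ids.idxOf x := by omega
      exact List.duplicate_iff_exists_distinct_get.mpr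
        ⟨⟨i, hi⟩, ⟨ids.idxOf x, hj⟩, hlt, by simp [hx], by simp [hgj]⟩
  have := List.duplicate_iff_two_le_count.mp hdup
  omega

-- a fold of increments at in-range nonnegative indices, read back at one position
lemma pvFold_count (js : List Int) : ∀ (a : List Int),
    (∀ j ∈ js, 0 ≤ j ∧ j < (a.length : Int)) → ∀ (p : Nat) (hp : p < a.length),
    (js.foldl pvInc a)[p]? = some (a[p] + (js.count ((p : Int)) : Int)) := by
  induction js with
  | nil => intro a _ p hp; simp
  | cons j js ih =>
    intro a hall p hp
    obtain ⟨hj0, hjl⟩ := hall j List.mem_cons_self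
    have hstep : pvInc a j = a.set j.toNat (a[j.toNat]'(by omega) + 1) := by
      rw [pvInc, PySem.List.pySetD_of_nonneg _ _ hj0,
          PySem.List.pyGetD_eq_getElem _ _ hj0 (by simpa using hjl)]
    have hlen : (pvInc a j).length = a.length := by rw [hstep]; simp
    rw [List.foldl_cons,
        ih (pvInc a j) (fun x hx => by rw [hlen]; exact hall x (List.mem_cons_of_mem _ hx)) p
          (by rw [hlen]; exact hp)]
    rw [List.count_cons]
    by_cases hjp : j = (p : Int)
    · have hjt : j.toNat = p := by omega
      have hb : (j == (p : Int)) = true := by simp [hjp]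
      simp only [hstep, hjt, List.getElem_set_self, hb, if_true, Option.some.injEq]
      push_cast
      ring
    · have hjt : j.toNat ≠ p := by omega
      have hb : (j == (p : Int)) = false := by simp [hjp]
      simp only [hstep, List.getElem_set_ne hjt, hb, Bool.false_eq_true, if_false,
        Nat.add_zero]

lemma pvFold_length (js : List Int) : ∀ (a : List Int), (js.foldl pvInc a).length = a.length := by
  induction js with
  | nil => intro a; rfl
  | cons j js ih =>
    intro a
    rw [List.foldl_cons, ih]
    simp [pvInc, PySem.List.length_pySetD]

-- B's per-id count on the deduped accused-by-u list equals A's triggered-pair count for u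
lemma pvCount_eq (L : List (String × String)) (cnt : PySem.Dict String Int) (k : Int) (u : String) :
    List.countP (fun p => p.1 == u)
      (((L.foldl pvStepA PySem.Dict.empty).items.flatMap
          (fun q => q.2.map (fun v => (v, q.1)))).filter (fun p => decide (k ≤ cnt.getD p.2 0)))
    = List.countP (fun b => decide (k ≤ cnt.getD b 0))
        (PySem.Set.ofList ((L.filter (fun p => p.1 == u)).map (fun p => p.2))) := by
  rw [List.Perm.countP_eq _ ((pvPA_perm L).filter _), List.countP_filter]
  have h1 : List.countP (fun p : String × String => p.1 == u && decide (k ≤ cnt.getD p.2 0))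
      (PySem.Set.ofList L)
      = List.countP (fun p : String × String => decide (k ≤ cnt.getD p.2 0) && (p.1 == u))
        (PySem.Set.ofList L) :=
    List.countP_congr (fun p _ => by rw [Bool.and_comm])
  rw [h1, ← List.countP_filter]
  have h2 : (fun p : String × String => decide (k ≤ cnt.getD p.2 0))
      = (fun b => decide (k ≤ cnt.getD b 0)) ∘ (fun p : String × String => p.2) := rfl
  rw [h2, ← List.countP_map, List.Perm.countP_eq _ (pvFstFilter_perm L u)]

-- ===== VERDICT (by name: the statement is the Claim_ definition above) =====
theorem solution_spec : Claim_equal_solution := by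
  intro ids report k _ hrep
  unfold Spec_solution
  simp only [solution, solution_alt]
  rw [pvFoldA_eq report (fun r hr => (hrep r hr).1),
      pvFoldB_eq report (fun r hr => (hrep r hr).1),
      pvA_flat,
      pvTA_eq (report.map pvToPair) k
        (PySem.Dict.counter
          ((((report.map pvToPair).map Prod.swap).foldl pvStepA PySem.Dict.empty).values.flatMap
            (fun s => s)))
        (pvCntB_eq (report.map pvToPair))]
  set L := report.map pvToPair with hLdef
  set cnt := PySem.Dict.counter
      (((L.map Prod.swap).foldl pvStepA PySem.Dict.empty).values.flatMap (fun s => s)) with hcnt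
  set idx := (PySem.List.enumerate ids).foldl (fun d p => d.insert p.2 p.1) PySem.Dict.empty
    with hidxdef
  set T := ((L.foldl pvStepA PySem.Dict.empty).items.flatMap
      (fun q => q.2.map (fun v => (v, q.1)))).filter
      (fun p => decide (k ≤ cnt.getD p.2 0)) with hTdef
  -- B's counter at any accused is exactly the distinct-reporter count Pre_ talks about
  have hc : ∀ a, cnt.getD a 0 = (pvDistinctReporters report a : Int) := by
    intro a
    rw [hcnt, pvCntB_eq L a, pvGetD_grp, PySem.Dict.getD_empty]
    have h3 : (L.filter (fun p => p.2 == a)).map (fun p => p.1)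
        = (report.filter (fun r' => (pvToPair r').2 == a)).map (fun r' => (pvToPair r').1) := by
      rw [hLdef, List.filter_map, List.map_map]
      rfl
    simp [pvDistinctReporters, h3, PySem.Set.update, PySem.Set.ofList_eq_foldl]
  have hTcnt : ∀ p ∈ T, ids.count p.1 = 1 := by
    intro p hp
    obtain ⟨hpF, hpred⟩ := List.mem_filter.mp hp
    have h1 : p ∈ PySem.Set.ofList L := ((pvPA_perm L).mem_iff).mp hpF
    rw [PySem.Set.mem_ofList] at h1
    obtain ⟨r, hr, rfl⟩ := List.mem_map.mp h1
    refine (hrep r hr).2 ?_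
    have h2 : k ≤ cnt.getD (pvToPair r).2 0 := of_decide_eq_true hpred
    rwa [hc] at h2
  have hTsub : ∀ p ∈ T, p.1 ∈ ids := fun p hp => List.count_pos_iff.mp (by rw [hTcnt p hp]; omega)
  have hidx : ∀ u, ids.count u = 1 → idx.getD u (-1) = (ids.idxOf u : Int) := by
    intro u hu
    rw [hidxdef, PySem.Dict.getD_eq_get?_getD, pvIdx_get?_mem ids u hu 0]
    simp
  rw [← List.foldl_map (f := fun p : String × String => idx.getD p.1 (-1)) (g := pvInc)]
  refine List.ext_getElem ?_ (fun i h1 h2 => ?_)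
  · rw [pvFold_length]
    simp
  · have hlen0 : (List.replicate ids.length (0 : Int)).length = ids.length :=
      List.length_replicate
    have hi : i < ids.length := by simpa using h2
    have hall : ∀ j ∈ T.map (fun p : String × String => idx.getD p.1 (-1)),
        0 ≤ j ∧ j < ((List.replicate ids.length (0 : Int)).length : Int) := by
      intro j hj
      obtain ⟨p, hp, rfl⟩ := List.mem_map.mp hj
      rw [hidx p.1 (hTcnt p hp), hlen0]
      have := List.idxOf_lt_length_of_mem (hTsub p hp)
      omega
    have hfc := pvFold_count _ _ hall i (by omega)
    rw [List.getElem?_eq_getElem (by rw [pvFold_length]; omega)] at hfc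
    have hA := Option.some.inj hfc
    rw [hA, List.getElem_replicate]
    -- the count of index i among the increments is the count of triggered pairs reported by ids[i]
    have hcount : (T.map (fun p : String × String => idx.getD p.1 (-1))).count ((i : Nat) : Int)
        = List.countP (fun p => p.1 == ids[i]) T := by
      rw [List.count_eq_countP, List.countP_map]
      refine List.countP_congr (fun p hp => ?_)
      have hpcnt := hTcnt p hp
      have hpin := hTsub p hp
      simp only [Function.comp_apply, hidx p.1 hpcnt, beq_iff_eq]
      constructor
      · intro hEq
        have hlt := List.idxOf_lt_length_of_mem hpin
        have h5 : ids[ids.idxOf p.1]? = some p.1 := by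
          rw [List.getElem?_eq_getElem hlt]
          exact congrArg some (List.getElem_idxOf hlt)
        have hidxeq : ids.idxOf p.1 = i := by exact_mod_cast hEq
        rw [hidxeq, List.getElem?_eq_getElem hi] at h5
        exact (Option.some.inj h5).symm
      · intro hEq
        rw [hEq] at hpcnt ⊢
        rw [pvIdxOf_eq hpcnt hi rfl]
    rw [hcount, hTdef, pvCount_eq L cnt k]
    -- now the B side
    rw [List.getElem_map]
    have hgrp : ((L.map Prod.swap).foldl pvStepA PySem.Dict.empty).getD ids[i] []
        = PySem.Set.ofList ((L.filter (fun p => p.1 == ids[i])).map (fun p => p.2)) := by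
      rw [pvGetD_grp, PySem.Dict.getD_empty]
      have h3 : ((L.map Prod.swap).filter (fun p => p.2 == ids[i])).map (fun p => p.1)
          = (L.filter (fun p => p.1 == ids[i])).map (fun p => p.2) := by
        rw [List.filter_map, List.map_map]
        rfl
      rw [h3]
      simp [PySem.Set.update, PySem.Set.ofList_eq_foldl]
    rw [hgrp]
    have hsum : ∀ (G : List String) (init : Int),
        G.foldl (fun acc a => acc + (if k ≤ cnt.getD a 0 then 1 else 0)) init
        = G.foldl (fun acc a => if k ≤ cnt.getD a 0 then acc + 1 else acc) init := by
      intro G init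
      refine PySem.List.foldl_congr_mem _ _ _ _ (fun acc a _ => ?_)
      by_cases h : k ≤ cnt.getD a 0 <;> simp [h]
    rw [hsum, PySem.List.foldl_ite_add_one]
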